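-- pv_equiv track=rewrite | github.com/matchpointer/tennis_environ | src/words.py | errors_count_after_symb_del
-- ===== SOURCE A (Python) =====
-- def errors_count(word1st, word2nd):
--     err_count = 0
--     for i in range(len(word1st)):
--         if word1st[i] != word2nd[i]:
--             err_count += 1
--     return err_count
--
-- def errors_count_after_symb_del(word1st, word2nd):
--     """ " must be: len(ward1st) >= len(ward2nd)"""
--     size1st = len(word1st)
--     err_count_min = size1st
--     for i in range(size1st):
--         err_count = errors_count(word1st[0:i] + word1st[i + 1:], word2nd)
--         if err_count < err_count_min:
--             err_count_min = err_count
--         if err_count_min == 0: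
--             return err_count_min
--     return err_count_min
-- ===== SOURCE B (Python) =====
-- def errors_count_after_symb_del(word1st, word2nd):
--     """O(n): prefix/suffix mismatch sums; each deletion position costs O(1)."""
--     n = len(word1st)
--     if n == 0:
--         return 0
--     # suf[k] = mismatches of word1st[k:] against word2nd shifted left by one
--     suf = [0] * (n + 1)
--     for j in range(n - 1, 0, -1):
--         suf[j] = suf[j + 1] + (word1st[j] != word2nd[j - 1])
--     best = suf[1]  # deleting index 0
--     pre = 0
--     for i in range(1, n):
--         pre += word1st[i - 1] != word2nd[i - 1]
--         best = min(best, pre + suf[i + 1])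
--     return best
-- ===== Notes on version B (the rewrite author's own statement) =====
-- stated objective: faster
-- what changed: Replaces the quadratic rebuild-and-rescan loop (one full mismatch count per deletion position) by one backward pass of shifted suffix mismatch sums plus one forward pass maintaining the prefix mismatch count, so each deletion position is evaluated in O(1).
import Mathlib
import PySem

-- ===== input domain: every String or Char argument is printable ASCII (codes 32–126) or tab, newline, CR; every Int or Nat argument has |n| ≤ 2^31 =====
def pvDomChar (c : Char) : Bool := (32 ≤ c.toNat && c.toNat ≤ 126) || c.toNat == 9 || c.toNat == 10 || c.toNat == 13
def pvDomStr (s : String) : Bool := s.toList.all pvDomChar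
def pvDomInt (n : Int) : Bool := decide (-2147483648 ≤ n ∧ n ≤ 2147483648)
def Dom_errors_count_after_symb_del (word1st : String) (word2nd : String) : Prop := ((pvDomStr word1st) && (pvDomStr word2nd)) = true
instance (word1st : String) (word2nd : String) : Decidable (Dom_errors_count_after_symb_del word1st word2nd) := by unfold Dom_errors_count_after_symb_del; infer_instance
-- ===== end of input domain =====

-- B replaces A's quadratic rebuild-and-rescan (one full mismatch count per deletion
-- position) by one backward pass of shifted suffix mismatch sums plus one forward
-- prefix pass: faster (asymptotic, O(n^2) -> O(n)).

-- ===== PORT A =====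
-- errors_count: indices i < len(word1st) so word1st[i] is in range (getD exact);
-- word2nd[i] raises IndexError when i >= len(word2nd) — Pre_ excludes exactly those
-- inputs, so inside Pre_ the getD default is never read and the port is exact.
def pvErrorsCount (w1 w2 : List Char) : Int :=
  (List.range w1.length).foldl
    (fun acc i => if w1.getD i ' ' ≠ w2.getD i ' ' then acc + 1 else acc) 0

-- the for-loop of A with its early `return` when err_count_min == 0;
-- word1st[0:i] = take i, word1st[i+1:] = drop (i+1) (exact: 0 ≤ i < len).
def pvLoopA (l1 l2 : List Char) : List Nat → Int → Int
  | [], m => m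
  | i :: rest, m =>
      let e := pvErrorsCount (l1.take i ++ l1.drop (i + 1)) l2
      let m' := if e < m then e else m
      if m' = 0 then m' else pvLoopA l1 l2 rest m'

def errors_count_after_symb_del (word1st : String) (word2nd : String) : Int :=
  let l1 := word1st.toList
  pvLoopA l1 word2nd.toList (List.range l1.length) (l1.length : Int)

-- ===== PORT B =====
-- Source B fills the array suf right-to-left by suf[j] = suf[j+1] + mismatch(j); the
-- port is the same defining recursion (memoization dropped, values identical).
def pvSuf (l1 l2 : List Char) (k : Nat) : Int :=
  if k < l1.length then
    pvSuf l1 l2 (k + 1) + (if l1.getD k ' ' ≠ l2.getD (k - 1) ' ' then 1 else 0)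
  else 0
termination_by l1.length - k

-- the forward loop of Source B: pre accumulates prefix mismatches, best the minimum.
def pvLoopB (l1 l2 : List Char) : List Nat → Int → Int → Int
  | [], _pre, best => best
  | i :: rest, pre, best =>
      let pre' := pre + (if l1.getD (i - 1) ' ' ≠ l2.getD (i - 1) ' ' then 1 else 0)
      pvLoopB l1 l2 rest pre' (min best (pre' + pvSuf l1 l2 (i + 1)))

def errors_count_after_symb_del_alt (word1st : String) (word2nd : String) : Int :=
  let l1 := word1st.toList
  let l2 := word2nd.toList
  let n := l1.length
  if n = 0 then 0
  else pvLoopB l1 l2 (List.range' 1 (n - 1)) 0 (pvSuf l1 l2 1)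

-- ===== PRECONDITION & SPEC =====
-- Pre_ excludes exactly the inputs on which A raises IndexError (word2nd more than
-- one char shorter than word1st); it excludes no input on which A returns.
def Pre_errors_count_after_symb_del (word1st : String) (word2nd : String) : Prop :=
  word1st.toList.length ≤ word2nd.toList.length + 1
instance (word1st : String) (word2nd : String) : Decidable (Pre_errors_count_after_symb_del word1st word2nd) := by unfold Pre_errors_count_after_symb_del; infer_instance

def pvWitness_errors_count_after_symb_del : String × String := ("cat", "at")

def Spec_errors_count_after_symb_del (word1st : String) (word2nd : String) (out : Int) : Prop := out = errors_count_after_symb_del_alt word1st word2nd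
instance (word1st : String) (word2nd : String) (out : Int) : Decidable (Spec_errors_count_after_symb_del word1st word2nd out) := by unfold Spec_errors_count_after_symb_del; infer_instance

-- ===== CLAIM (what is proved, stated in full; the proofs are below) =====
def Claim_equal_errors_count_after_symb_del : Prop := ∀ (word1st : String) (word2nd : String), Dom_errors_count_after_symb_del word1st word2nd → Pre_errors_count_after_symb_del word1st word2nd → Spec_errors_count_after_symb_del word1st word2nd (errors_count_after_symb_del word1st word2nd)

-- ===== LEMMAS AND PROOFS =====

-- single-position mismatch indicators (proof-side)
def pvMisP (l1 l2 : List Char) (j : Nat) : Int :=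
  if l1.getD j ' ' ≠ l2.getD j ' ' then 1 else 0

def pvMisS (l1 l2 : List Char) (j : Nat) : Int :=
  if l1.getD j ' ' ≠ l2.getD (j - 1) ' ' then 1 else 0

def pvPre (l1 l2 : List Char) (i : Nat) : Int := ((List.range i).map (pvMisP l1 l2)).sum

def pvF (l1 l2 : List Char) (i : Nat) : Int := pvPre l1 l2 i + pvSuf l1 l2 (i + 1)

theorem pvPre_zero (l1 l2 : List Char) : pvPre l1 l2 0 = 0 := rfl

theorem pvPre_succ (l1 l2 : List Char) (i : Nat) :
    pvPre l1 l2 (i + 1) = pvPre l1 l2 i + pvMisP l1 l2 i := by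
  simp [pvPre, List.range_succ]

theorem pvMisP_nonneg (l1 l2 : List Char) (j : Nat) : 0 ≤ pvMisP l1 l2 j := by
  unfold pvMisP; split <;> norm_num

theorem pvPre_nonneg (l1 l2 : List Char) (i : Nat) : 0 ≤ pvPre l1 l2 i := by
  induction i with
  | zero => simp [pvPre_zero]
  | succ i ih => rw [pvPre_succ]; have := pvMisP_nonneg l1 l2 i; omega

theorem pvSuf_nonneg (l1 l2 : List Char) (k : Nat) : 0 ≤ pvSuf l1 l2 k := by
  rw [pvSuf]
  split
  · have := pvSuf_nonneg l1 l2 (k + 1)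
    split <;> omega
  · omega
termination_by l1.length - k

theorem pvSuf_le (l1 l2 : List Char) (k : Nat) (hk : k ≤ l1.length) :
    pvSuf l1 l2 k ≤ (l1.length : Int) - k := by
  by_cases h : k < l1.length
  · rw [pvSuf]
    simp only [h, if_true]
    have := pvSuf_le l1 l2 (k + 1) h
    split <;> push_cast at * <;> omega
  · rw [pvSuf]
    simp only [h, if_false]
    have : k = l1.length := by omega
    omega
termination_by l1.length - k

theorem pvF_nonneg (l1 l2 : List Char) (i : Nat) : 0 ≤ pvF l1 l2 i := by
  unfold pvF
  have := pvPre_nonneg l1 l2 i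
  have := pvSuf_nonneg l1 l2 (i + 1)
  omega

-- pvSuf as a sum over the shifted indices
theorem pvSuf_eq_sum (l1 l2 : List Char) (k : Nat) :
    pvSuf l1 l2 k = ((List.range' k (l1.length - k)).map (pvMisS l1 l2)).sum := by
  by_cases h : k < l1.length
  · rw [pvSuf]
    simp only [h, if_true]
    have hn : l1.length - k = (l1.length - (k + 1)) + 1 := by omega
    rw [pvSuf_eq_sum l1 l2 (k + 1), hn, List.range'_succ, List.map_cons, List.sum_cons]
    simp [pvMisS]
    ring
  · rw [pvSuf]
    simp only [h, if_false]
    have : l1.length - k = 0 := by omega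
    simp [this]
termination_by l1.length - k

-- errors_count as a sum
theorem foldl_if_add (p : Nat → Prop) [DecidablePred p] :
    ∀ (is : List Nat) (a : Int),
      is.foldl (fun acc i => if p i then acc + 1 else acc) a
        = a + (is.map (fun i => if p i then (1 : Int) else 0)).sum := by
  intro is
  induction is with
  | nil => intro a; simp
  | cons i rest ih =>
      intro a
      simp only [List.foldl_cons, List.map_cons, List.sum_cons, ih]
      split <;> ring

theorem pvErrorsCount_eq_sum (w1 w2 : List Char) :
    pvErrorsCount w1 w2 = ((List.range w1.length).map (pvMisP w1 w2)).sum := by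
  unfold pvErrorsCount
  rw [foldl_if_add (fun i => w1.getD i ' ' ≠ w2.getD i ' ')]
  rw [Int.zero_add]
  rfl

-- splice lookups
theorem splice_get_left (l1 : List Char) (i j : Nat) (hj : j < i) (hi : i ≤ l1.length) :
    (l1.take i ++ l1.drop (i + 1))[j]? = l1[j]? := by
  have hjl : j < (l1.take i).length := by simp [List.length_take]; omega
  simp [List.getElem?_append_left hjl, hj]

theorem splice_get_right (l1 : List Char) (i t : Nat) (hi : i ≤ l1.length) :
    (l1.take i ++ l1.drop (i + 1))[i + t]? = l1[i + 1 + t]? := by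
  have hlen : (l1.take i).length = i := by simp [hi]
  rw [List.getElem?_append_right (by omega)]
  rw [hlen, List.getElem?_drop]
  congr 1
  omega

-- the key lemma: one deletion position, evaluated by prefix + shifted suffix
theorem pvErrorsCount_splice (l1 l2 : List Char) (i : Nat) (hi : i < l1.length) :
    pvErrorsCount (l1.take i ++ l1.drop (i + 1)) l2 = pvF l1 l2 i := by
  have hi' : i ≤ l1.length := le_of_lt hi
  have hlen : (l1.take i ++ l1.drop (i + 1)).length = i + (l1.length - (i + 1)) := by
    simp [hi']
  rw [pvErrorsCount_eq_sum, hlen, List.range_add, List.map_append, List.sum_append]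
  unfold pvF
  congr 1
  · -- prefix part
    unfold pvPre
    apply congrArg
    apply List.map_congr_left
    intro j hj
    have hj' : j < i := List.mem_range.mp hj
    simp only [pvMisP, List.getD]
    simp only [splice_get_left l1 i j hj' hi']
    rfl
  · -- suffix part
    rw [pvSuf_eq_sum, List.range'_eq_map_range, List.map_map, List.map_map]
    apply congrArg
    apply List.map_congr_left
    intro t ht
    simp only [Function.comp_def]
    simp only [pvMisP, pvMisS, List.getD]
    simp only [splice_get_right l1 i t hi']
    simp only [show i + 1 + t - 1 = i + t from by omega]

-- A's loop with early return equals a plain fold of min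
theorem foldl_min_zero (f : Nat → Int) :
    ∀ is : List Nat, (∀ i ∈ is, 0 ≤ f i) →
      is.foldl (fun m i => min m (f i)) 0 = 0 := by
  intro is
  induction is with
  | nil => intro _; rfl
  | cons i rest ih =>
      intro h
      have h0 : 0 ≤ f i := h i (by simp)
      simp only [List.foldl_cons]
      rw [min_eq_left h0]
      exact ih (fun j hj => h j (by simp [hj]))

theorem pvLoopA_eq_foldl (l1 l2 : List Char) :
    ∀ (is : List Nat) (m : Int),
      (∀ i ∈ is, 0 ≤ pvErrorsCount (l1.take i ++ l1.drop (i + 1)) l2) →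
      pvLoopA l1 l2 is m
        = is.foldl (fun m i => min m (pvErrorsCount (l1.take i ++ l1.drop (i + 1)) l2)) m := by
  intro is
  induction is with
  | nil => intro m _; rfl
  | cons i rest ih =>
      intro m h
      simp only [pvLoopA, List.foldl_cons]
      set e := pvErrorsCount (l1.take i ++ l1.drop (i + 1)) l2 with he
      have hmin : (if e < m then e else m) = min m e := by
        rcases le_or_gt m e with h' | h'
        · simp [min_eq_left h', not_lt.mpr h']
        · simp [min_eq_right (le_of_lt h'), h']
      rw [hmin]
      by_cases hz : min m e = 0
      · simp only [hz, if_true]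
        exact (foldl_min_zero _ rest (fun j hj => h j (by simp [hj]))).symm
      · simp only [hz, if_false]
        exact ih (min m e) (fun j hj => h j (by simp [hj]))

-- B's forward loop computes the fold of min over pvF
theorem pvLoopB_eq_foldl (l1 l2 : List Char) :
    ∀ (rem k : Nat) (best : Int),
      pvLoopB l1 l2 (List.range' (k + 1) rem) (pvPre l1 l2 k) best
        = (List.range' (k + 1) rem).foldl (fun b j => min b (pvF l1 l2 j)) best := by
  intro rem
  induction rem with
  | zero => intro k best; rfl
  | succ rem ih =>
      intro k best
      rw [List.range'_succ]
      simp only [pvLoopB, List.foldl_cons]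
      have hpre : pvPre l1 l2 k
          + (if l1.getD (k + 1 - 1) ' ' ≠ l2.getD (k + 1 - 1) ' ' then (1 : Int) else 0)
          = pvPre l1 l2 (k + 1) := by
        rw [pvPre_succ]
        simp [pvMisP]
      rw [hpre]
      have := ih (k + 1) (min best (pvPre l1 l2 (k + 1) + pvSuf l1 l2 (k + 1 + 1)))
      simpa [pvF] using this

-- main equivalence
theorem main_equiv (w1 w2 : String) :
    errors_count_after_symb_del w1 w2 = errors_count_after_symb_del_alt w1 w2 := by
  unfold errors_count_after_symb_del errors_count_after_symb_del_alt
  set l1 := w1.toList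
  set l2 := w2.toList
  by_cases h0 : l1.length = 0
  · simp [h0, pvLoopA]
  · simp only [h0, if_false]
    -- A's side: fold of min over range
    have hA : pvLoopA l1 l2 (List.range l1.length) (l1.length : Int)
        = (List.range l1.length).foldl
            (fun m i => min m (pvErrorsCount (l1.take i ++ l1.drop (i + 1)) l2)) (l1.length : Int) := by
      apply pvLoopA_eq_foldl
      intro i hi
      rw [pvErrorsCount_splice l1 l2 i (List.mem_range.mp hi)]
      exact pvF_nonneg l1 l2 i
    rw [hA]
    have hcong : (List.range l1.length).foldl
        (fun m i => min m (pvErrorsCount (l1.take i ++ l1.drop (i + 1)) l2)) (l1.length : Int)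
        = (List.range l1.length).foldl (fun m i => min m (pvF l1 l2 i)) (l1.length : Int) := by
      apply PySem.List.foldl_congr_mem
      intro acc i hi
      rw [pvErrorsCount_splice l1 l2 i (List.mem_range.mp hi)]
    rw [hcong]
    -- split off index 0
    obtain ⟨m, hm⟩ := Nat.exists_eq_succ_of_ne_zero h0
    have hsplit : List.range l1.length = 0 :: List.range' 1 (l1.length - 1) := by
      rw [hm, List.range_eq_range', List.range'_succ]
      simp
    rw [hsplit]
    simp only [List.foldl_cons]
    have hf0 : pvF l1 l2 0 = pvSuf l1 l2 1 := by simp [pvF, pvPre_zero]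
    have hlt : pvF l1 l2 0 ≤ (l1.length : Int) := by
      rw [hf0]
      have := pvSuf_le l1 l2 1 (by omega)
      omega
    rw [min_eq_right hlt, hf0]
    -- B's side
    have hB := pvLoopB_eq_foldl l1 l2 (l1.length - 1) 0 (pvSuf l1 l2 1)
    rw [pvPre_zero] at hB
    exact hB.symm

-- ===== VERDICT (by name: the statement is the Claim_ definition above) =====
theorem errors_count_after_symb_del_spec : Claim_equal_errors_count_after_symb_del := by
  intro w1 w2 _dom _pre
  unfold Spec_errors_count_after_symb_del
  exact main_equiv w1 w2
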